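-- pv_equiv track=rewrite | github.com/pcolladosoto/robot_calibration | Calibration_script_final.py | populate_signal
-- ===== SOURCE A (Python) =====
-- CONSTANTS = {
--     "ARDUINO_BAUDRATE": 38400,
--     "REDUCING_FACTOR": 50.9,
--     "ENC_PULSES_PER_REV": 7,
--     "NOM_DIAMETER": 190,
--     "WHEELBASE": 535,
--     "N_TURNS": 8,
--     "N_REPS": 1,
--     "ED": 1,
--     "ES": 1,
--     "DR": -1,
--     "K": -1,
--     "PULSES_PER_REV": 356.3,
--     "MM_TO_PULSES": 1.675281,
--     "ESTIMATED_PULSES_PER_TURN": 2006.53,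
--     "REAL_PULSES_PER_TURN_L": -1,
--     "REAL_PULSES_PER_TURN_R": -1,
--     "REAL_PULSES_PER_TURN_BOTH": -1,
--     "NOISE_THRESHOLD": 100,
--     "WINDOW_LIMITS": 0.1,
-- }
--
-- def populate_signal(pulses_array, distances_array):
--     populated_array = []
--     index = 0
--     i = 0
--     n_jumps = 0
--     last_x = 0
--     for x in pulses_array:
--         if x < last_x:
--             n_jumps += 1
--         while index < x + n_jumps * 256:
--             if distances_array[i] < CONSTANTS["NOISE_THRESHOLD"]:
--                 populated_array.append(distances_array[i])
--             index += 1
--         last_x = x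
--         i += 1
--
--     return populated_array
-- ===== SOURCE B (Python) =====
-- NOISE_THRESHOLD = 100  # == CONSTANTS["NOISE_THRESHOLD"] in the original module
--
-- def populate_signal(pulses_array, distances_array):
--     # Staged pipeline instead of a fused loop with an inner counter:
--     # Stage 1: unwrap the 8-bit rollover into absolute target indices.
--     targets = []
--     jumps = 0
--     prev = 0
--     for x in pulses_array:
--         if x < prev:
--             jumps += 1
--         targets.append(x + jumps * 256)
--         prev = x
--     # Stage 2: the output position each pulse starts at = running max of targets (seed 0).
--     starts = []
--     m = 0
--     for t in targets:
--         starts.append(m)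
--         m = max(m, t)
--     # Stage 3: flatten: each pulse contributes max(0, t - s) copies of its sample if below threshold.
--     return [d
--             for (t, s), d in zip(zip(targets, starts), distances_array)
--             if d < NOISE_THRESHOLD
--             for _ in range(max(0, t - s))]
-- ===== Notes on version B (the rewrite author's own statement) =====
-- stated objective: faster
-- what changed: Replaces A's fused loop with an inner one-step-at-a-time index counter by a staged pipeline: unwrap the 8-bit rollover into absolute target indices, compute each pulse's start position as a running max, then flatten with one comprehension appending max(0, t - s) copies of each below-threshold sample in a single block.
-- outside the precondition, e.g. on populate_signal([0, 0], []): A returns [], B returns []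
import Mathlib
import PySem

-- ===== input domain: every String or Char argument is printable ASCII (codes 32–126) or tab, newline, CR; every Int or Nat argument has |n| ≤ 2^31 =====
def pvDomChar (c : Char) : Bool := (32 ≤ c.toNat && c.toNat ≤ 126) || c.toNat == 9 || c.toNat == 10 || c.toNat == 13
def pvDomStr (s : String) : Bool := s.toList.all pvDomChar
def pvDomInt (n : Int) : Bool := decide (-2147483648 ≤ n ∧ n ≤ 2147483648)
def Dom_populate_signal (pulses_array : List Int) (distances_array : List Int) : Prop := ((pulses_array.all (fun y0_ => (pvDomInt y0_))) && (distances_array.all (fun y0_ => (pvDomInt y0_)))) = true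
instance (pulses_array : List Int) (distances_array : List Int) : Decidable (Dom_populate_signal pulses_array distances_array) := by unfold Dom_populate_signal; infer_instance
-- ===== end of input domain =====

-- B replaces A's fused loop (inner one-step-at-a-time counter) by a staged pipeline:
-- unwrap targets, running-max start positions, then flatten by block — asymptotically faster.


-- ===== PORT A =====
-- A's inner 'while index < x + n_jumps * 256' loop; distances_array[i] is read each
-- iteration ('.getD 0' only stands in where Python would raise IndexError, excluded by Pre_)
def pvWhileA (distances : List Int) (i : Nat) (target index : Int) (acc : List Int) :
    Int × List Int :=
  if index < target then
    let d := (PySem.List.pyGet? distances (i : Int)).getD 0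
    pvWhileA distances i target (index + 1) (if d < 100 then acc ++ [d] else acc)
  else (index, acc)
termination_by (target - index).toNat
decreasing_by omega

-- the body of 'for x in pulses_array'; state = (populated_array, index, i, n_jumps, last_x)
def pvStepA (distances : List Int) (st : List Int × Int × Nat × Int × Int) (x : Int) :
    List Int × Int × Nat × Int × Int :=
  let nj := if x < st.2.2.2.2 then st.2.2.2.1 + 1 else st.2.2.2.1
  let r := pvWhileA distances st.2.2.1 (x + nj * 256) st.2.1 st.1
  (r.2, r.1, st.2.2.1 + 1, nj, x)

def populate_signal (pulses_array : List Int) (distances_array : List Int) : List Int :=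
  (pulses_array.foldl (pvStepA distances_array) ([], 0, 0, 0, 0)).1

-- ===== PORT B =====
-- stage 1 loop body: state = (targets, jumps, prev)
def pvStep1 (st : List Int × Int × Int) (x : Int) : List Int × Int × Int :=
  let jumps := if x < st.2.2 then st.2.1 + 1 else st.2.1
  (st.1 ++ [x + jumps * 256], jumps, x)

-- stage 2 loop body: state = (starts, m)
def pvStep2 (st : List Int × Int) (t : Int) : List Int × Int :=
  (st.1 ++ [st.2], max st.2 t)

def populate_signal_alt (pulses_array : List Int) (distances_array : List Int) : List Int :=
  let targets := (pulses_array.foldl pvStep1 ([], 0, 0)).1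
  let starts := (targets.foldl pvStep2 ([], 0)).1
  ((targets.zip starts).zip distances_array).flatMap
    (fun p => if p.2 < 100 then List.replicate (max 0 (p.1.1 - p.1.2)).toNat p.2 else [])

-- ===== PRECONDITION & SPEC =====
-- Pre_ excludes the inputs on which Python A raises IndexError (distances_array too
-- short).  It is slightly narrower than A's exact domain: when no pulse ever requires
-- advancing the index, A also returns normally on a shorter distances_array
-- (e.g. ([0, 0], []) → []); B returns the same value there, the bound is just a simple
-- closed form covering all raising inputs.
def Pre_populate_signal (pulses_array : List Int) (distances_array : List Int) : Prop :=
  pulses_array.length ≤ distances_array.length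
instance (pulses_array : List Int) (distances_array : List Int) : Decidable (Pre_populate_signal pulses_array distances_array) := by unfold Pre_populate_signal; infer_instance
def pvWitness_populate_signal : List Int × List Int := ([3, 10, 2], [5, 200, 7])

def Spec_populate_signal (pulses_array : List Int) (distances_array : List Int) (out : List Int) : Prop := out = populate_signal_alt pulses_array distances_array
instance (pulses_array : List Int) (distances_array : List Int) (out : List Int) : Decidable (Spec_populate_signal pulses_array distances_array out) := by unfold Spec_populate_signal; infer_instance

-- ===== CLAIM =====
def Claim_equal_populate_signal : Prop := ∀ (pulses_array : List Int) (distances_array : List Int), Dom_populate_signal pulses_array distances_array → Pre_populate_signal pulses_array distances_array → Spec_populate_signal pulses_array distances_array (populate_signal pulses_array distances_array)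

-- ===== LEMMAS AND PROOFS =====

-- common denominator: per-pulse blocks, indexing distances by position i
def pvSpecRun (distances : List Int) (xs : List Int) (m : Int) (i : Nat) (nj last : Int) :
    List Int :=
  match xs with
  | [] => []
  | x :: xs =>
    let nj' := if x < last then nj + 1 else nj
    let t := x + nj' * 256
    let d := (PySem.List.pyGet? distances (i : Int)).getD 0
    (if d < 100 then List.replicate (t - m).toNat d else []) ++
      pvSpecRun distances xs (max m t) (i + 1) nj' x

-- A's inner while loop in closed form
theorem pvWhileA_eq (distances : List Int) (i : Nat) (target index : Int) (acc : List Int) :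
    pvWhileA distances i target index acc =
      if index < target then
        (target,
          if (PySem.List.pyGet? distances (i : Int)).getD 0 < 100 then
            acc ++ List.replicate (target - index).toNat
              ((PySem.List.pyGet? distances (i : Int)).getD 0)
          else acc)
      else (index, acc) := by
  by_cases h : index < target
  · generalize hn : (target - index).toNat = n
    induction n generalizing index acc with
    | zero => omega
    | succ k ih =>
      rw [pvWhileA]
      simp only [h, if_pos]
      by_cases h2 : index + 1 < target
      · rw [ih (index + 1) _ h2 (by omega)]
        simp only [h2, if_pos]
        split_ifs with hd
        · simp [List.replicate_succ, List.append_assoc]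
        · rfl
      · rw [pvWhileA]
        simp only [h2, if_neg, not_false_iff]
        have hk : k = 0 := by omega
        subst hk
        have ht : target = index + 1 := by omega
        simp [ht]
  · rw [pvWhileA]; simp [h]

-- A's fold produces the per-pulse blocks
theorem pv_foldA (distances xs : List Int) (acc : List Int) (m : Int) (i : Nat)
    (nj last : Int) :
    (xs.foldl (pvStepA distances) (acc, m, i, nj, last)).1 =
      acc ++ pvSpecRun distances xs m i nj last := by
  induction xs generalizing acc m i nj last with
  | nil => simp [pvSpecRun]
  | cons x xs ih =>
    rw [List.foldl_cons]
    show (xs.foldl (pvStepA distances) (pvStepA distances (acc, m, i, nj, last) x)).1 = _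
    have hstep :
        pvStepA distances (acc, m, i, nj, last) x =
          (let nj' := if x < last then nj + 1 else nj;
           let t := x + nj' * 256;
           let d := (PySem.List.pyGet? distances (i : Int)).getD 0;
           (acc ++ (if d < 100 then List.replicate (t - m).toNat d else []),
            max m t, i + 1, nj', x)) := by
      simp only [pvStepA, pvWhileA_eq]
      split_ifs with h hd hd <;> simp_all <;> omega
    rw [hstep, ih]
    simp [pvSpecRun, List.append_assoc]

-- stage 1 fold = recursive targets list
def pvT (xs : List Int) (nj last : Int) : List Int :=
  match xs with
  | [] => []
  | x :: xs =>
    let nj' := if x < last then nj + 1 else nj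
    (x + nj' * 256) :: pvT xs nj' x

theorem pv_fold1 (xs ts : List Int) (nj last : Int) :
    (xs.foldl pvStep1 (ts, nj, last)).1 = ts ++ pvT xs nj last := by
  induction xs generalizing ts nj last with
  | nil => simp [pvT]
  | cons x xs ih => rw [List.foldl_cons]; simp only [pvStep1]; rw [ih]; simp [pvT]

-- stage 2 fold = recursive starts list
def pvS (ts : List Int) (m : Int) : List Int :=
  match ts with
  | [] => []
  | t :: ts => m :: pvS ts (max m t)

theorem pv_fold2 (ts ss : List Int) (m : Int) :
    (ts.foldl pvStep2 (ss, m)).1 = ss ++ pvS ts m := by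
  induction ts generalizing ss m with
  | nil => simp [pvS]
  | cons t ts ih => rw [List.foldl_cons]; simp only [pvStep2]; rw [ih]; simp [pvS]

-- stage 3 flatten over the zipped pipeline = the per-pulse blocks
theorem pv_main (distances : List Int) (xs : List Int) (m : Int) (i : Nat)
    (nj last : Int) (hlen : i + xs.length ≤ distances.length) :
    (((pvT xs nj last).zip (pvS (pvT xs nj last) m)).zip (distances.drop i)).flatMap
        (fun p => if p.2 < 100 then List.replicate (max 0 (p.1.1 - p.1.2)).toNat p.2 else []) =
      pvSpecRun distances xs m i nj last := by
  induction xs generalizing m i nj last with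
  | nil => simp [pvT, pvSpecRun]
  | cons x xs ih =>
    have hi : i < distances.length := by simp at hlen; omega
    have hdrop : distances.drop i = distances[i] :: distances.drop (i + 1) :=
      List.drop_eq_getElem_cons hi
    have hget : (PySem.List.pyGet? distances (i : Int)).getD 0 = distances[i] := by
      rw [PySem.List.pyGet?_natCast]
      simp [List.getElem?_eq_getElem hi]
    simp only [pvT, pvS, pvSpecRun, hdrop, List.zip_cons_cons, List.flatMap_cons]
    rw [ih _ (i + 1) _ _ (by simp at hlen ⊢; omega)]
    rw [hget]
    congr 1
    split_ifs <;> first | rfl | (congr 1; omega)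

-- ===== VERDICT =====
theorem populate_signal_spec : Claim_equal_populate_signal := by
  intro pulses distances _ hpre
  unfold Spec_populate_signal populate_signal populate_signal_alt
  simp only [pv_foldA, pv_fold1, pv_fold2, List.nil_append]
  exact (pv_main distances pulses 0 0 0 0 (by simpa using hpre)).symm
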